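-- pv_equiv track=rewrite | github.com/ayatsuliak/LNU_Computer_Graphic | Lab1/Processing/lab1/file.py | find_nth_happy_number
-- ===== SOURCE A (Python) =====
-- def find_nth_happy_number(N, max_attempts=1000000):
--     n = 1
--     attempts = 0
--
--     while N > 0 and attempts < max_attempts:
--         if is_happy_number(n):
--             N -= 1
--         n += 1
--         attempts += 1
--
--     if N == 0:
--         return n - 1  # Останнє перевірене число є N-м щасливим числом
--     else:
--         return None  # Якщо не вдається знайти N щасливих чисел
--
-- def is_happy_number(num):
--     num_str = str(num)
--     return all(char in '47' for char in num_str)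
-- ===== SOURCE B (Python) =====
-- def find_nth_happy_number(N, max_attempts=1000000):
--     # The k-th number whose digits are all 4/7 is read off the binary
--     # representation of k+1 (bits below the leading 1: 0->4, 1->7).
--     if N < 0:
--         return None
--     if N == 0:
--         return 0
--     m = N + 1
--     bits = []
--     while m > 1:
--         bits.append(m % 2)
--         m //= 2
--     h = 0
--     for b in reversed(bits):
--         h = 10 * h + (7 if b else 4)
--     return h if h <= max_attempts else None
-- ===== Notes on version B (the rewrite author's own statement) =====
-- stated objective: faster
-- what changed: A scans every integer 1,2,3,... testing each for 4/7-only digits until N hits 0 or max_attempts is exhausted; B constructs the N-th 4/7-number directly from the binary representation of N+1 (bits below the leading 1 map 0->4, 1->7) and just compares it with max_attempts.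
import Mathlib
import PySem

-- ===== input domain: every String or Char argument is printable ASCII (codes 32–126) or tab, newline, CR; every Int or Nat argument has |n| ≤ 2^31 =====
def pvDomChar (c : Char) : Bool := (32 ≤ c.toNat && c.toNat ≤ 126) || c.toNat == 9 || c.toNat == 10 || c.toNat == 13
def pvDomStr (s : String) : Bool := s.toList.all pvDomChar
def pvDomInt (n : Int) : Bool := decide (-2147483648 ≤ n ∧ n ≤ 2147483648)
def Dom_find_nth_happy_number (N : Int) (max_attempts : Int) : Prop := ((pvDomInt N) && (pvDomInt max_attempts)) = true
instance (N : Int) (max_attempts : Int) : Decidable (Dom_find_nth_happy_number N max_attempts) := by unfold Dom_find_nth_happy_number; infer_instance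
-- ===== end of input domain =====

-- B constructs the N-th 4/7-digit number directly from the binary form of N+1 instead of
-- scanning and testing every integer; equal return value is proved on all inputs.

-- ===== PORT A =====
def is_happy_number (num : Int) : Bool :=
  (PySem.Int.toChars num).all (fun c => PySem.Chars.isIn [c] ['4', '7'])

-- the while loop of A: fuel = max_attempts - attempts (remaining allowed iterations); state (N, n)
def findLoopA : Nat → Int → Int → Int × Int
  | 0, N, n => (N, n)
  | fuel+1, N, n =>
    if N > 0 then
      findLoopA fuel (if is_happy_number n then N - 1 else N) (n + 1)
    else (N, n)

def find_nth_happy_number (N : Int) (max_attempts : Int) : Option Int :=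
  let r := findLoopA max_attempts.toNat N 1
  if r.1 = 0 then some (r.2 - 1) else none

-- ===== PORT B =====
-- the `while m > 1` loop of B: appends m % 2, halves m (fuel only for totality)
def bitsOfAlt : Nat → Int → List Int → List Int
  | 0, _, bits => bits
  | fuel+1, m, bits =>
    if m > 1 then bitsOfAlt fuel (PySem.Int.floordiv m 2) (bits ++ [PySem.Int.mod m 2])
    else bits

def find_nth_happy_number_alt (N : Int) (max_attempts : Int) : Option Int :=
  if N < 0 then none
  else if N = 0 then some 0
  else
    let bits := bitsOfAlt (N + 1).toNat (N + 1) []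
    let h := bits.reverse.foldl (fun h b => 10 * h + (if b ≠ 0 then (7 : Int) else 4)) 0
    if h ≤ max_attempts then some h else none

-- ===== PRECONDITION & SPEC =====
def Spec_find_nth_happy_number (N : Int) (max_attempts : Int) (out : Option Int) : Prop := out = find_nth_happy_number_alt N max_attempts
instance (N : Int) (max_attempts : Int) (out : Option Int) : Decidable (Spec_find_nth_happy_number N max_attempts out) := by unfold Spec_find_nth_happy_number; infer_instance

-- ===== CLAIM (what is proved, stated in full; the proofs are below) =====
def Claim_equal_find_nth_happy_number : Prop := ∀ (N : Int) (max_attempts : Int), Dom_find_nth_happy_number N max_attempts → Spec_find_nth_happy_number N max_attempts (find_nth_happy_number N max_attempts)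

-- ===== LEMMAS AND PROOFS =====

-- `is_happy_number` on a natural number, via Nat.toDigits
def hapD (k : Nat) : Bool :=
  (Nat.toDigits 10 k).all (fun c => PySem.Chars.isIn [c] ['4', '7'])

lemma hap_eq (k : Nat) : is_happy_number (k : Int) = hapD k := by
  simp [is_happy_number, hapD, PySem.Int.toChars, show ¬((k : Int) < 0) from by omega]

set_option maxRecDepth 8192 in
lemma hapD_lt10 (k : Nat) (h1 : k < 10) : hapD k = true ↔ (k = 4 ∨ k = 7) := by
  interval_cases k <;> decide

set_option maxRecDepth 8192 in
lemma chk_digitChar (d : Nat) (h : d < 10) :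
    PySem.Chars.isIn [d.digitChar] ['4', '7'] = decide (d = 4 ∨ d = 7) := by
  interval_cases d <;> decide

lemma hapD_ge10 (k : Nat) (h : 10 ≤ k) :
    hapD k = true ↔ (hapD (k / 10) = true ∧ (k % 10 = 4 ∨ k % 10 = 7)) := by
  unfold hapD
  rw [Nat.toDigits_eq_if (by norm_num), if_neg (by omega)]
  simp [List.all_append, chk_digitChar _ (Nat.mod_lt k (by norm_num))]

-- the m-th element (m ≥ 2 ↦ 1st, 2nd, …) of the 4/7 numbers, read off the binary bits of m
def g (m : Nat) : Nat :=
  if h : m < 4 then (if m ≤ 2 then 4 else 7)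
  else 10 * g (m / 2) + (if m % 2 = 0 then 4 else 7)
decreasing_by omega

lemma g_two : g 2 = 4 := by simp [g]
lemma g_three : g 3 = 7 := by simp [g]
lemma g_rec (m : Nat) (h : 4 ≤ m) : g m = 10 * g (m / 2) + (if m % 2 = 0 then 4 else 7) := by
  rw [g]; simp [Nat.not_lt.mpr h]

lemma g_ge4 (m : Nat) : 4 ≤ g m := by
  by_cases h : m < 4
  · rw [g]; simp [h]; split <;> omega
  · rw [g_rec m (by omega)]; split <;> omega

lemma g_happy (m : Nat) : hapD (g m) = true := by
  induction m using Nat.strong_induction_on with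
  | _ m ih =>
    by_cases h : m < 4
    · rw [g]; simp [h]; split <;> decide
    · rw [g_rec m (by omega)]
      have h4 := g_ge4 (m / 2)
      rw [hapD_ge10 _ (by split <;> omega)]
      constructor
      · have : (10 * g (m / 2) + if m % 2 = 0 then 4 else 7) / 10 = g (m / 2) := by
          split <;> omega
        rw [this]; exact ih (m / 2) (by omega)
      · split <;> omega

lemma g_mono_succ (m : Nat) (h : 2 ≤ m) : g m < g (m + 1) := by
  induction m using Nat.strong_induction_on with
  | _ m ih =>
    by_cases h4 : m < 4
    · interval_cases m
      · rw [g_two, g_three]; omega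
      · rw [g_three, g_rec 4 (by omega)]
        have : (4 : Nat) / 2 = 2 := by omega
        rw [this, g_two]; omega
    · rw [g_rec m (by omega), g_rec (m + 1) (by omega)]
      rcases Nat.even_or_odd m with he | ho
      · have h2 : m % 2 = 0 := Nat.even_iff.mp he
        have h1 : (m + 1) % 2 = 1 := by omega
        have hd : (m + 1) / 2 = m / 2 := by omega
        rw [hd]; simp [h2, h1]
      · have h2 : m % 2 = 1 := Nat.odd_iff.mp ho
        have h1 : (m + 1) % 2 = 0 := by omega
        have hd : (m + 1) / 2 = m / 2 + 1 := by omega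
        have hih : g (m / 2) < g (m / 2 + 1) := ih (m / 2) (by omega) (by omega)
        rw [hd]; simp [h2, h1]; omega

lemma g_mono (a b : Nat) (ha : 2 ≤ a) (hab : a < b) : g a < g b := by
  induction b with
  | zero => omega
  | succ b ih =>
    rcases Nat.lt_succ_iff_lt_or_eq.mp hab with h | h
    · exact lt_trans (ih h) (g_mono_succ b (by omega))
    · subst h; exact g_mono_succ a ha

lemma g_surj (n : Nat) (h0 : 0 < n) (hh : hapD n = true) : ∃ m, 2 ≤ m ∧ g m = n := by
  induction n using Nat.strong_induction_on with
  | _ n ih =>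
    by_cases h10 : n < 10
    · rcases (hapD_lt10 n h10).mp hh with h | h
      · exact ⟨2, by omega, by rw [g_two]; omega⟩
      · exact ⟨3, by omega, by rw [g_three]; omega⟩
    · obtain ⟨hq, hr⟩ := (hapD_ge10 n (by omega)).mp hh
      obtain ⟨m0, hm0, hg0⟩ := ih (n / 10) (by omega) (by omega) hq
      refine ⟨2 * m0 + n % 10 % 2, by omega, ?_⟩
      have h4 : 4 ≤ 2 * m0 + n % 10 % 2 := by omega
      rw [g_rec _ h4]
      have hdiv : (2 * m0 + n % 10 % 2) / 2 = m0 := by omega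
      have hmod : (2 * m0 + n % 10 % 2) % 2 = n % 10 % 2 := by omega
      rw [hdiv, hmod, hg0]
      rcases hr with h | h <;> simp [h] <;> omega

-- number of happy numbers in [1, k]
def cnt (k : Nat) : Nat := ((Finset.Icc 1 k).filter (fun i => hapD i = true)).card

lemma cnt_zero : cnt 0 = 0 := by simp [cnt]

lemma cnt_succ (k : Nat) : cnt (k + 1) = cnt k + (if hapD (k + 1) = true then 1 else 0) := by
  unfold cnt
  have hins : Finset.Icc 1 (k + 1) = insert (k + 1) (Finset.Icc 1 k) := by
    ext x; simp only [Finset.mem_Icc, Finset.mem_insert]; omega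
  rw [hins, Finset.filter_insert]
  split
  · rw [Finset.card_insert_of_notMem (by simp)]
  · simp

lemma cnt_g (m : Nat) (h : 2 ≤ m) : cnt (g m) = m - 1 := by
  unfold cnt
  have hcard : ((Finset.Icc 1 (g m)).filter (fun i => hapD i = true)).card = (Finset.Icc 2 m).card := by
    refine (Finset.card_bij (fun a _ => g a) ?_ ?_ ?_).symm
    · intro a ha
      simp only [Finset.mem_Icc] at ha
      simp only [Finset.mem_filter, Finset.mem_Icc]
      refine ⟨⟨by have := g_ge4 a; omega, ?_⟩, g_happy a⟩
      rcases Nat.lt_or_ge a m with hl | hg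
      · exact le_of_lt (g_mono a m ha.1 hl)
      · have : a = m := by omega
        rw [this]
    · intro a ha b hb hab
      simp only [Finset.mem_Icc] at ha hb
      simp only at hab
      by_contra hne
      rcases Nat.lt_or_ge a b with hl | hg
      · have := g_mono a b ha.1 hl; omega
      · have : b < a := by omega
        have := g_mono b a hb.1 this; omega
    · intro n hn
      simp only [Finset.mem_filter, Finset.mem_Icc] at hn
      obtain ⟨⟨h1, h2⟩, hh⟩ := hn
      obtain ⟨m0, hm0, hg0⟩ := g_surj n (by omega) hh
      refine ⟨m0, ?_, hg0⟩
      simp only [Finset.mem_Icc]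
      refine ⟨hm0, ?_⟩
      by_contra hgt
      have : g m < g m0 := g_mono m m0 h (by omega)
      omega
  rw [hcard, Nat.card_Icc]; omega

-- the loop with one more unit of fuel performs one more trailing step
lemma findLoopA_step (fuel : Nat) :
    ∀ N n, findLoopA (fuel + 1) N n =
      (let r := findLoopA fuel N n;
       if r.1 > 0 then (if is_happy_number r.2 then r.1 - 1 else r.1, r.2 + 1) else r) := by
  induction fuel with
  | zero =>
    intro N n
    by_cases hN : N > 0 <;> simp [findLoopA, hN]
  | succ fuel ih =>
    intro N n
    by_cases hN : N > 0
    · show findLoopA (fuel + 1 + 1) N n = _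
      rw [show findLoopA (fuel + 1 + 1) N n = findLoopA (fuel + 1) (if is_happy_number n then N - 1 else N) (n + 1) from by simp [findLoopA, hN]]
      rw [ih]
      simp only [findLoopA, if_pos hN]
    · simp [findLoopA, hN]

lemma findLoopA_nonpos (F : Nat) (N : Int) (h : N ≤ 0) (n : Int) : findLoopA F N n = (N, n) := by
  cases F <;> simp [findLoopA, h]

-- main loop characterisation
lemma findLoopA_main (N : Nat) (hN : 1 ≤ N) (F : Nat) :
    (g (N + 1) ≤ F → findLoopA F (N : Int) 1 = (0, (g (N + 1) : Int) + 1)) ∧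
    (F < g (N + 1) → findLoopA F (N : Int) 1 = ((N : Int) - (cnt F : Int), (F : Int) + 1) ∧ cnt F < N) := by
  induction F with
  | zero =>
    constructor
    · intro h; have := g_ge4 (N + 1); omega
    · intro _
      refine ⟨?_, by rw [cnt_zero]; omega⟩
      simp [findLoopA, cnt_zero]
  | succ F ihF =>
    rw [findLoopA_step]
    by_cases hle : g (N + 1) ≤ F
    · have h1 := ihF.1 hle
      rw [h1]
      constructor
      · intro _; simp
      · intro h; omega
    · push Not at hle
      obtain ⟨hst, hcnt⟩ := ihF.2 hle
      rw [hst]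
      have hpos : (0 : Int) < (N : Int) - (cnt F : Int) := by
        have : (cnt F : Int) < (N : Int) := by exact_mod_cast hcnt
        omega
      have hcast : ((F : Int) + 1) = ((F + 1 : Nat) : Int) := by push_cast; ring
      simp only [gt_iff_lt, hcast, hap_eq, if_pos hpos]
      by_cases hh : hapD (F + 1) = true
      · simp only [if_pos hh]
        by_cases heq : g (N + 1) = F + 1
        · have hcg : cnt (F + 1) = N := by
            rw [← heq, cnt_g (N + 1) (by omega)]; omega
          have hcF : cnt F = N - 1 := by
            have := cnt_succ F
            rw [if_pos hh] at this; omega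
          constructor
          · intro _
            have e1 : (N : Int) - (cnt F : Int) - 1 = 0 := by
              rw [hcF]; omega
            have e2 : ((F + 1 : Nat) : Int) + 1 = (g (N + 1) : Int) + 1 := by
              rw [← heq]
            rw [e1, e2]
          · intro h; omega
        · have hlt : F + 1 < g (N + 1) := by omega
          constructor
          · intro h; omega
          · intro _
            have hc1 : cnt (F + 1) = cnt F + 1 := by
              have := cnt_succ F; rw [if_pos hh] at this; omega
            obtain ⟨m0, hm0, hg0⟩ := g_surj (F + 1) (by omega) hh
            have hm0lt : m0 < N + 1 := by
              by_contra hge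
              rcases Nat.eq_or_lt_of_le (Nat.le_of_not_lt hge) with he | hl
              · rw [he, hg0] at hlt; omega
              · have := g_mono (N + 1) m0 (by omega) hl
                rw [hg0] at this; omega
            have hcnew : cnt (F + 1) < N := by
              have : cnt (F + 1) = m0 - 1 := by rw [← hg0, cnt_g m0 hm0]
              omega
            refine ⟨?_, hcnew⟩
            have e1 : (N : Int) - (cnt F : Int) - 1 = (N : Int) - (cnt (F + 1) : Int) := by
              rw [hc1]; push_cast; ring
            rw [e1]
      · simp only [if_neg hh]
        have hneq : g (N + 1) ≠ F + 1 := by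
          intro he; rw [← he] at hh; exact hh (g_happy (N + 1))
        have hc1 : cnt (F + 1) = cnt F := by
          have := cnt_succ F; rw [if_neg hh] at this; omega
        constructor
        · intro h; omega
        · intro _
          rw [hc1]
          exact ⟨rfl, by omega⟩

-- B's bit loop and fold compute g
lemma bitsOfAlt_acc (fuel : Nat) : ∀ (m : Int) (acc : List Int),
    bitsOfAlt fuel m acc = acc ++ bitsOfAlt fuel m [] := by
  induction fuel with
  | zero => intro m acc; simp [bitsOfAlt]
  | succ fuel ih =>
    intro m acc
    by_cases h : m > 1
    · simp only [bitsOfAlt, if_pos h]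
      rw [ih _ (acc ++ [PySem.Int.mod m 2]), ih _ ([] ++ [PySem.Int.mod m 2])]
      simp
    · simp [bitsOfAlt, h]

lemma bitsOfAlt_one (fuel : Nat) (m : Int) (h : m ≤ 1) : bitsOfAlt fuel m [] = [] := by
  cases fuel <;> simp [bitsOfAlt]
  omega

lemma fold_bits_eq_g (m : Nat) (h2 : 2 ≤ m) : ∀ fuel, m ≤ fuel →
    ((bitsOfAlt fuel (m : Int) []).reverse.foldl (fun h b => 10 * h + (if b ≠ 0 then (7 : Int) else 4)) 0) = (g m : Int) := by
  induction m using Nat.strong_induction_on with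
  | _ m ih =>
    intro fuel hf
    obtain ⟨f, rfl⟩ : ∃ f, fuel = f + 1 := ⟨fuel - 1, by omega⟩
    have hfd : PySem.Int.floordiv (m : Int) 2 = ((m / 2 : Nat) : Int) := by
      exact_mod_cast PySem.Int.floordiv_natCast m 2
    have hmod : PySem.Int.mod (m : Int) 2 = ((m % 2 : Nat) : Int) := by
      exact_mod_cast PySem.Int.mod_natCast m 2
    have hgt : ((m : Int) > 1) := by exact_mod_cast h2
    rw [show bitsOfAlt (f + 1) (m : Int) [] = bitsOfAlt f ((m / 2 : Nat) : Int) [((m % 2 : Nat) : Int)] from by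
      simp only [bitsOfAlt, if_pos hgt, hfd, hmod, List.nil_append]]
    rw [bitsOfAlt_acc f ((m / 2 : Nat) : Int) [((m % 2 : Nat) : Int)]]
    by_cases h4 : m < 4
    · have h1 : (m / 2 : Nat) = 1 := by omega
      rw [h1, show ((1 : Nat) : Int) = 1 from by norm_num, bitsOfAlt_one f 1 (by omega)]
      interval_cases m <;> simp [g_two, g_three]
    · have hge : 2 ≤ m / 2 := by omega
      have hfl : m / 2 ≤ f := by omega
      have hih := ih (m / 2) (by omega) hge f hfl
      rw [List.reverse_append, List.foldl_append]
      simp only [List.reverse_singleton, List.foldl_cons, List.foldl_nil] at *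
      rw [hih, g_rec m (by omega)]
      rcases Nat.even_or_odd m with he | ho
      · have : m % 2 = 0 := Nat.even_iff.mp he
        simp [this]
      · have : m % 2 = 1 := Nat.odd_iff.mp ho
        simp [this]

-- ===== VERDICT (by name: the statement is the Claim_ definition above) =====
theorem find_nth_happy_number_spec : Claim_equal_find_nth_happy_number := by
  unfold Claim_equal_find_nth_happy_number
  intro N M _
  unfold Spec_find_nth_happy_number find_nth_happy_number find_nth_happy_number_alt
  by_cases hneg : N < 0
  · rw [findLoopA_nonpos _ _ (by omega)]
    simp only [if_pos hneg]
    have : ¬ (N = 0) := by omega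
    simp [this]
  · by_cases h0 : N = 0
    · subst h0
      rw [findLoopA_nonpos _ _ (by omega)]
      norm_num
    · have hN1 : 1 ≤ N := by omega
      obtain ⟨K, hK⟩ : ∃ K : Nat, N = (K : Int) := ⟨N.toNat, by omega⟩
      subst hK
      have hK1 : 1 ≤ K := by exact_mod_cast hN1
      have hNp1 : ((K : Int) + 1) = ((K + 1 : Nat) : Int) := by push_cast; ring
      have hB := fold_bits_eq_g (K + 1) (by omega) (K + 1) le_rfl
      simp only [if_neg hneg, if_neg h0, hNp1, Int.toNat_natCast, hB]
      have hG4 := g_ge4 (K + 1)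
      by_cases hle : g (K + 1) ≤ M.toNat
      · rw [(findLoopA_main K hK1 M.toNat).1 hle]
        have hMle : ((g (K + 1) : Nat) : Int) ≤ M := by omega
        simp [hMle]
      · obtain ⟨hst, hcnt⟩ := (findLoopA_main K hK1 M.toNat).2 (by omega)
        rw [hst]
        have hne : (K : Int) - (cnt M.toNat : Int) ≠ 0 := by
          have : (cnt M.toNat : Int) < (K : Int) := by exact_mod_cast hcnt
          omega
        have hMgt : ¬ ((g (K + 1) : Nat) : Int) ≤ M := by omega
        simp [hne, hMgt]
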